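-- pv_equiv track=rewrite | github.com/interactive-cookbook/recipe-generation | amr_processing/splitting_preconditions.py | cluster_node_pairs
-- ===== SOURCE A (Python) =====
-- from typing import Dict, List
--
-- def cluster_node_pairs(node_pairs: List) -> List:
--     """
--     Creates the clusters of nodes that should not get separated based on pairs of nodes that should be kept
--     together
--     Example:
--     node_pairs = [(1, 2), (2, 5), (3, 4), (7, 8), (6, 0), (6, 9), (10, 0)]
--     then returns the following clusters: [[1, 2, 5], [3, 4], [7, 8], [6, 0, 9, 10]]
--     :param node_pairs: list of node pairs that should not get separated
--     :return: list of the clustered nodes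
--     """
--     current_cluster_id = 0
--     cluster_dict = dict()
--
--     for (node1, node2) in node_pairs:
--         if node1 not in cluster_dict.keys() and node2 not in cluster_dict.keys():
--             cluster_dict[node1] = current_cluster_id
--             cluster_dict[node2] = current_cluster_id
--             current_cluster_id += 1
--         elif node1 not in cluster_dict.keys():
--             cluster_dict[node1] = cluster_dict[node2]
--         elif node2 not in cluster_dict.keys():
--             cluster_dict[node2] = cluster_dict[node1]
--
--     number_of_clusters = current_cluster_id
--     node_clusters = [[] for cl in range(number_of_clusters)]
--     for node, cl_id in cluster_dict.items():
--         node_clusters[cl_id].append(node)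
--
--     return node_clusters
-- ===== SOURCE B (Python) =====
-- def cluster_node_pairs(node_pairs):
--     """Single-pass clustering: build the cluster lists directly, mapping each
--     node to the index of its cluster, instead of numbering clusters in a dict
--     and inverting it in a second pass."""
--     clusters = []
--     node_to_cluster = {}
--     for node1, node2 in node_pairs:
--         if node1 not in node_to_cluster and node2 not in node_to_cluster:
--             node_to_cluster[node1] = len(clusters)
--             if node2 != node1:
--                 node_to_cluster[node2] = len(clusters)
--                 clusters.append([node1, node2])
--             else:
--                 clusters.append([node1])
--         elif node1 not in node_to_cluster:
--             idx = node_to_cluster[node2]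
--             clusters[idx].append(node1)
--             node_to_cluster[node1] = idx
--         elif node2 not in node_to_cluster:
--             idx = node_to_cluster[node1]
--             clusters[idx].append(node2)
--             node_to_cluster[node2] = idx
--     return clusters
-- ===== Notes on version B (the rewrite author's own statement) =====
-- stated objective: simpler
-- what changed: B builds the cluster lists directly in one pass, mapping each node to its cluster's index, instead of numbering clusters in a node->id dict and inverting that dict into lists in a second pass.
import Mathlib
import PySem

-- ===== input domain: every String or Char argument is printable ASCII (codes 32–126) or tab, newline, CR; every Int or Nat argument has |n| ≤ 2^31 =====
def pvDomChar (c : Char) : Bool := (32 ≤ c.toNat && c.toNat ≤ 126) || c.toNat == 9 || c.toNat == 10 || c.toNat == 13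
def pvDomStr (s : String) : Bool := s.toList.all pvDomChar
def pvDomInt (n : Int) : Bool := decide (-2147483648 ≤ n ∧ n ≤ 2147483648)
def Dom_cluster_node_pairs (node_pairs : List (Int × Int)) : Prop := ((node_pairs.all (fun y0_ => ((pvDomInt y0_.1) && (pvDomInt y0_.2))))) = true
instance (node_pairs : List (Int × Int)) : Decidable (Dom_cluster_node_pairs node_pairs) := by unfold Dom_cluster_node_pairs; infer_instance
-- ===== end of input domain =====

-- B is simpler: it builds the cluster lists directly in one pass (node -> cluster index),
-- instead of numbering clusters in a node->id dict and inverting it in a second pass.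

-- ===== PORT A =====
-- one iteration of A's first loop: state = (cluster_dict, current_cluster_id)
def pvStepA (st : PySem.Dict Int Int × Int) (p : Int × Int) : PySem.Dict Int Int × Int :=
  match st, p with
  | (d, cid), (n1, n2) =>
    if !(d.contains n1) && !(d.contains n2) then
      ((d.insert n1 cid).insert n2 cid, cid + 1)
    else if !(d.contains n1) then
      (d.insert n1 (d.getD n2 0), cid)  -- cluster_dict[node2]: key present in this branch
    else if !(d.contains n2) then
      (d.insert n2 (d.getD n1 0), cid)
    else (d, cid)

-- A's second loop: node_clusters[cl_id].append(node) over cluster_dict.items()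
def pvInvFold (l : List (Int × Int)) (acc : List (List Int)) : List (List Int) :=
  l.foldl (fun acc q => PySem.List.pySetD acc q.2 (PySem.List.pyGetD acc q.2 [] ++ [q.1])) acc

def cluster_node_pairs (node_pairs : List (Int × Int)) : List (List Int) :=
  let st := node_pairs.foldl pvStepA (PySem.Dict.empty, 0)
  let node_clusters := (PySem.List.pyRange 0 st.2 1).map (fun _ => ([] : List Int))
  pvInvFold st.1.items node_clusters

-- ===== PORT B =====
-- one iteration of B's loop: state = (clusters, node_to_cluster)
def pvStepB (st : List (List Int) × PySem.Dict Int Int) (p : Int × Int) : List (List Int) × PySem.Dict Int Int :=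
  match st, p with
  | (clusters, m), (n1, n2) =>
    if !(m.contains n1) && !(m.contains n2) then
      let m1 := m.insert n1 (PySem.List.len clusters)
      if n2 != n1 then
        (clusters ++ [[n1, n2]], m1.insert n2 (PySem.List.len clusters))
      else
        (clusters ++ [[n1]], m1)
    else if !(m.contains n1) then
      let idx := m.getD n2 0
      (PySem.List.pySetD clusters idx (PySem.List.pyGetD clusters idx [] ++ [n1]), m.insert n1 idx)
    else if !(m.contains n2) then
      let idx := m.getD n1 0
      (PySem.List.pySetD clusters idx (PySem.List.pyGetD clusters idx [] ++ [n2]), m.insert n2 idx)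
    else (clusters, m)

def cluster_node_pairs_alt (node_pairs : List (Int × Int)) : List (List Int) :=
  (node_pairs.foldl pvStepB ([], PySem.Dict.empty)).1

-- ===== PRECONDITION & SPEC =====
def Spec_cluster_node_pairs (node_pairs : List (Int × Int)) (out : List (List Int)) : Prop := out = cluster_node_pairs_alt node_pairs
instance (node_pairs : List (Int × Int)) (out : List (List Int)) : Decidable (Spec_cluster_node_pairs node_pairs out) := by unfold Spec_cluster_node_pairs; infer_instance

-- ===== CLAIM (what is proved, stated in full; the proofs are below) =====
def Claim_equal_cluster_node_pairs : Prop := ∀ (node_pairs : List (Int × Int)), Dom_cluster_node_pairs node_pairs → Spec_cluster_node_pairs node_pairs (cluster_node_pairs node_pairs)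

-- ===== LEMMAS AND PROOFS =====

-- the simulation invariant between A's state (d, cid) and B's state (clusters, m)
def pvInv (d : PySem.Dict Int Int) (cid : Int) (clusters : List (List Int)) (m : PySem.Dict Int Int) : Prop :=
  m = d ∧ cid = (clusters.length : Int) ∧ d.keys.Nodup ∧
  (∀ q ∈ d.items, 0 ≤ q.2 ∧ q.2 < cid) ∧
  pvInvFold d.items (List.replicate clusters.length []) = clusters

theorem pvInv_init : pvInv PySem.Dict.empty 0 [] PySem.Dict.empty := by
  refine ⟨rfl, rfl, by decide, by decide, rfl⟩

theorem pvInvFold_append_last (l : List (Int × Int)) (acc : List (List Int)) (x : List Int)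
    (h : ∀ q ∈ l, 0 ≤ q.2 ∧ q.2 < (acc.length : Int)) :
    pvInvFold l (acc ++ [x]) = pvInvFold l acc ++ [x] := by
  induction l generalizing acc with
  | nil => rfl
  | cons q t ih =>
      obtain ⟨h0, h1⟩ := h q (by simp)
      have hi : q.2 = ((q.2.toNat : Nat) : Int) := by omega
      have hlt : q.2.toNat < acc.length := by omega
      simp only [pvInvFold, List.foldl_cons] at *
      rw [hi, PySem.List.pyGetD_natCast, PySem.List.pyGetD_natCast,
          PySem.List.pySetD_natCast, PySem.List.pySetD_natCast]
      have hg : (acc ++ [x]).getD q.2.toNat [] = acc.getD q.2.toNat [] := by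
        simp [List.getD, List.getElem?_append_left hlt]
      rw [hg, List.set_append_left _ _ hlt]
      exact ih _ (fun r hr => by
        have := h r (by simp [hr])
        simpa using this)

-- pvInvFold restated structurally (used by the proofs)
theorem pvInvFold_append (l1 l2 : List (Int × Int)) (acc : List (List Int)) :
    pvInvFold (l1 ++ l2) acc = pvInvFold l2 (pvInvFold l1 acc) := by
  unfold pvInvFold; rw [List.foldl_append]

theorem pvInvFold_singleton (q : Int × Int) (acc : List (List Int)) :
    pvInvFold [q] acc = PySem.List.pySetD acc q.2 (PySem.List.pyGetD acc q.2 [] ++ [q.1]) := rfl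

-- a "node_clusters[cl_id].append(node)" step at the freshly appended last slot
theorem pvStep_at_end (clusters : List (List Int)) (c : List Int) (n : Int) :
    PySem.List.pySetD (clusters ++ [c]) ((clusters.length : Nat) : Int)
      (PySem.List.pyGetD (clusters ++ [c]) ((clusters.length : Nat) : Int) [] ++ [n])
    = clusters ++ [c ++ [n]] := by
  rw [PySem.List.pyGetD_natCast, PySem.List.pySetD_natCast]
  have hg : (clusters ++ [c]).getD clusters.length [] = c := by
    simp [List.getD]
  rw [hg, List.set_append_right _ _ (by omega)]
  simp

theorem pvInvFold_single_end (clusters : List (List Int)) (c : List Int) (n : Int) :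
    pvInvFold [(n, ((clusters.length : Nat) : Int))] (clusters ++ [c]) = clusters ++ [c ++ [n]] := by
  rw [pvInvFold_singleton]; exact pvStep_at_end clusters c n

-- length is preserved by an in-range pySetD
theorem pvLen_pySetD (clusters : List (List Int)) (v : Int) (w : List Int) (h0 : 0 ≤ v) :
    (PySem.List.pySetD clusters v w).length = clusters.length := by
  have : v = ((v.toNat : Nat) : Int) := by omega
  rw [this, PySem.List.pySetD_natCast, List.length_set]

-- getD of a contained key is the value of its (unique) item
theorem pvGetD_mem_items (d : PySem.Dict Int Int) (k : Int) (hnd : d.keys.Nodup)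
    (h : d.contains k = true) : (k, d.getD k 0) ∈ d.items := by
  rw [PySem.Dict.contains_iff_mem_keys] at h
  simp only [PySem.Dict.keys] at h
  obtain ⟨q, hq, hk⟩ := List.mem_map.1 h
  have hv : d.getD q.1 0 = q.2 := PySem.Dict.getD_of_mem_items d (by simpa using hq) hnd 0
  rw [← hk, hv]
  simpa using hq

-- one simultaneous loop iteration preserves the invariant
theorem pvInv_step (d : PySem.Dict Int Int) (cid : Int) (clusters : List (List Int))
    (m : PySem.Dict Int Int) (p : Int × Int) (h : pvInv d cid clusters m) :
    pvInv (pvStepA (d, cid) p).1 (pvStepA (d, cid) p).2 (pvStepB (clusters, m) p).1 (pvStepB (clusters, m) p).2 := by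
  obtain ⟨hm, hcid, hnd, hbd, hfold⟩ := h
  obtain ⟨n1, n2⟩ := p
  rw [hm]
  have hcid' : cid = ((clusters.length : Nat) : Int) := hcid
  by_cases hc1 : d.contains n1 = true <;> by_cases hc2 : d.contains n2 = true
  · -- both present: no-op
    have hA : pvStepA (d, cid) (n1, n2) = (d, cid) := by simp [pvStepA, hc1, hc2]
    have hB : pvStepB (clusters, d) (n1, n2) = (clusters, d) := by simp [pvStepB, hc1, hc2]
    rw [hA, hB]
    exact ⟨rfl, hcid, hnd, hbd, hfold⟩
  · -- n1 present, n2 fresh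
    rw [Bool.not_eq_true] at hc2
    have hA : pvStepA (d, cid) (n1, n2) = (d.insert n2 (d.getD n1 0), cid) := by
      simp [pvStepA, hc1, hc2]
    have hB : pvStepB (clusters, d) (n1, n2) =
        (PySem.List.pySetD clusters (d.getD n1 0)
          (PySem.List.pyGetD clusters (d.getD n1 0) [] ++ [n2]), d.insert n2 (d.getD n1 0)) := by
      simp [pvStepB, hc1, hc2]
    rw [hA, hB]
    have hmem := pvGetD_mem_items d n1 hnd hc1
    have hv := hbd _ hmem
    have hlen := pvLen_pySetD clusters (d.getD n1 0)
      (PySem.List.pyGetD clusters (d.getD n1 0) [] ++ [n2]) hv.1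
    refine ⟨rfl, by rw [hlen, ← hcid], PySem.Dict.nodup_keys_insert d n2 _ hnd, ?_, ?_⟩
    · intro q hq
      rw [PySem.Dict.items_insert_of_not_contains _ _ hc2] at hq
      rcases List.mem_append.1 hq with hq | hq
      · exact hbd q hq
      · simp at hq; rw [hq]; exact ⟨hv.1, hv.2⟩
    · rw [PySem.Dict.items_insert_of_not_contains _ _ hc2, hlen,
          pvInvFold_append, hfold, pvInvFold_singleton]
  · -- n1 fresh, n2 present
    rw [Bool.not_eq_true] at hc1
    have hA : pvStepA (d, cid) (n1, n2) = (d.insert n1 (d.getD n2 0), cid) := by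
      simp [pvStepA, hc1, hc2]
    have hB : pvStepB (clusters, d) (n1, n2) =
        (PySem.List.pySetD clusters (d.getD n2 0)
          (PySem.List.pyGetD clusters (d.getD n2 0) [] ++ [n1]), d.insert n1 (d.getD n2 0)) := by
      simp [pvStepB, hc1, hc2]
    rw [hA, hB]
    have hmem := pvGetD_mem_items d n2 hnd hc2
    have hv := hbd _ hmem
    have hlen := pvLen_pySetD clusters (d.getD n2 0)
      (PySem.List.pyGetD clusters (d.getD n2 0) [] ++ [n1]) hv.1
    refine ⟨rfl, by rw [hlen, ← hcid], PySem.Dict.nodup_keys_insert d n1 _ hnd, ?_, ?_⟩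
    · intro q hq
      rw [PySem.Dict.items_insert_of_not_contains _ _ hc1] at hq
      rcases List.mem_append.1 hq with hq | hq
      · exact hbd q hq
      · simp at hq; rw [hq]; exact ⟨hv.1, hv.2⟩
    · rw [PySem.Dict.items_insert_of_not_contains _ _ hc1, hlen,
          pvInvFold_append, hfold, pvInvFold_singleton]
  · -- both fresh
    rw [Bool.not_eq_true] at hc1 hc2
    have hbase : pvInvFold d.items (List.replicate (clusters.length + 1) []) = clusters ++ [[]] := by
      rw [List.replicate_succ']
      rw [pvInvFold_append_last _ _ _ (by
        intro q hq
        have := hbd q hq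
        rw [hcid] at this
        simpa using this)]
      rw [hfold]
    by_cases hne : n2 = n1
    · subst hne
      have hA : pvStepA (d, cid) (n2, n2) = (d.insert n2 cid, cid + 1) := by
        simp [pvStepA, hc2, PySem.Dict.insert_insert_self]
      have hB : pvStepB (clusters, d) (n2, n2) =
          (clusters ++ [[n2]], d.insert n2 (PySem.List.len clusters)) := by
        simp [pvStepB, hc2]
      rw [hA, hB]
      refine ⟨by rw [PySem.List.len_eq, ← hcid'], by simp; omega,
        PySem.Dict.nodup_keys_insert d n2 cid hnd, ?_, ?_⟩
      · intro q hq
        rw [PySem.Dict.items_insert_of_not_contains _ _ hc2] at hq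
        rcases List.mem_append.1 hq with hq | hq
        · have := hbd q hq; omega
        · simp at hq; rw [hq]; simp; omega
      · rw [PySem.Dict.items_insert_of_not_contains _ _ hc2]
        have h1 : (clusters ++ [[n2]]).length = clusters.length + 1 := by simp
        rw [h1, pvInvFold_append, hbase]
        simp only [hcid']
        rw [pvInvFold_single_end clusters [] n2]
        simp
    · have hA : pvStepA (d, cid) (n1, n2) = ((d.insert n1 cid).insert n2 cid, cid + 1) := by
        simp [pvStepA, hc1, hc2]
      have hB : pvStepB (clusters, d) (n1, n2) =
          (clusters ++ [[n1, n2]],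
           (d.insert n1 (PySem.List.len clusters)).insert n2 (PySem.List.len clusters)) := by
        simp [pvStepB, hc1, hc2, hne]
      rw [hA, hB]
      have hcI : (d.insert n1 cid).contains n2 = false := by
        rw [PySem.Dict.contains_insert, hc2]; simp [hne]
      refine ⟨by rw [PySem.List.len_eq, ← hcid'], by simp; omega, ?_, ?_, ?_⟩
      · exact PySem.Dict.nodup_keys_insert _ n2 cid (PySem.Dict.nodup_keys_insert d n1 cid hnd)
      · intro q hq
        rw [PySem.Dict.items_insert_of_not_contains _ _ hcI,
            PySem.Dict.items_insert_of_not_contains _ _ hc1] at hq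
        rcases List.mem_append.1 hq with hq | hq
        · rcases List.mem_append.1 hq with hq | hq
          · have := hbd q hq; omega
          · simp at hq; rw [hq]; simp; omega
        · simp at hq; rw [hq]; simp; omega
      · rw [PySem.Dict.items_insert_of_not_contains _ _ hcI,
            PySem.Dict.items_insert_of_not_contains _ _ hc1]
        have h1 : (clusters ++ [[n1, n2]]).length = clusters.length + 1 := by simp
        rw [h1, pvInvFold_append, pvInvFold_append, hbase]
        simp only [hcid']
        rw [pvInvFold_single_end clusters [] n1,
            pvInvFold_single_end clusters ([] ++ [n1]) n2]
        simp

theorem pvInv_foldl (l : List (Int × Int)) (d : PySem.Dict Int Int) (cid : Int)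
    (clusters : List (List Int)) (m : PySem.Dict Int Int) (h : pvInv d cid clusters m) :
    pvInv (l.foldl pvStepA (d, cid)).1 (l.foldl pvStepA (d, cid)).2
          (l.foldl pvStepB (clusters, m)).1 (l.foldl pvStepB (clusters, m)).2 := by
  induction l generalizing d cid clusters m with
  | nil => exact h
  | cons p t ih =>
      have h' := pvInv_step d cid clusters m p h
      simpa using ih _ _ _ _ h'

-- ===== VERDICT (by name: the statement is the Claim_ definition above) =====
theorem cluster_node_pairs_spec : Claim_equal_cluster_node_pairs := by
  intro np _
  unfold Spec_cluster_node_pairs cluster_node_pairs cluster_node_pairs_alt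
  have hInv := pvInv_foldl np PySem.Dict.empty 0 [] PySem.Dict.empty pvInv_init
  obtain ⟨hm, hcid, hnd, hbd, hfold⟩ := hInv
  simp only []
  rw [hcid]
  have hrange : (PySem.List.pyRange 0 (((np.foldl pvStepB ([], PySem.Dict.empty)).1.length : Nat) : Int) 1).map
      (fun _ => ([] : List Int)) = List.replicate (np.foldl pvStepB ([], PySem.Dict.empty)).1.length [] := by
    rw [PySem.List.pyRange_one, List.map_map]
    simp [Function.comp_def, List.map_const']
  rw [hrange]
  exact hfold
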